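-- pv_equiv track=rewrite | github.com/Vertick/PlazaRobotica-Loterias | src/metrics/structural_metrics.py | decade_distribution
-- ===== SOURCE A (Python) =====
-- from typing import List, Dict
--
-- def _validate_combination(numbers: List[int]) -> None:
--     if len(numbers) != 5:
--         raise ValueError("A Gordo combination must contain exactly 5 numbers")
--     if len(set(numbers)) != 5:
--         raise ValueError("Combination contains repeated numbers")
--
-- def decade_distribution(numbers: List[int]) -> Dict[str, int]:
--     _validate_combination(numbers)
--
--     bins = {
--         "d1_09": 0,
--         "d10_19": 0,
--         "d20_29": 0,
--         "d30_39": 0,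
--         "d40_49": 0,
--         "d50_54": 0,
--     }
--
--     for n in numbers:
--         if 1 <= n <= 9:
--             bins["d1_09"] += 1
--         elif 10 <= n <= 19:
--             bins["d10_19"] += 1
--         elif 20 <= n <= 29:
--             bins["d20_29"] += 1
--         elif 30 <= n <= 39:
--             bins["d30_39"] += 1
--         elif 40 <= n <= 49:
--             bins["d40_49"] += 1
--         elif 50 <= n <= 54:
--             bins["d50_54"] += 1
--
--     return bins
-- ===== SOURCE B (Python) =====
-- from typing import List, Dict
--
-- def _validate_combination(numbers: List[int]) -> None:
--     if len(numbers) != 5: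
--         raise ValueError("A Gordo combination must contain exactly 5 numbers")
--     if len(set(numbers)) != 5:
--         raise ValueError("Combination contains repeated numbers")
--
-- def decade_distribution(numbers: List[int]) -> Dict[str, int]:
--     _validate_combination(numbers)
--     bounds = [("d1_09", 1, 9), ("d10_19", 10, 19), ("d20_29", 20, 29),
--               ("d30_39", 30, 39), ("d40_49", 40, 49), ("d50_54", 50, 54)]
--     return {k: sum(1 for n in numbers if lo <= n <= hi) for (k, lo, hi) in bounds}
-- ===== Notes on version B (the rewrite author's own statement) =====
-- stated objective: alternative
-- what changed: Instead of one pass over the numbers mutating six counters through an if/elif cascade, B makes one counting pass per bin: a dict comprehension over a (key, lo, hi) table that counts the numbers falling in each range, never mutating any counter.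
import Mathlib
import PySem

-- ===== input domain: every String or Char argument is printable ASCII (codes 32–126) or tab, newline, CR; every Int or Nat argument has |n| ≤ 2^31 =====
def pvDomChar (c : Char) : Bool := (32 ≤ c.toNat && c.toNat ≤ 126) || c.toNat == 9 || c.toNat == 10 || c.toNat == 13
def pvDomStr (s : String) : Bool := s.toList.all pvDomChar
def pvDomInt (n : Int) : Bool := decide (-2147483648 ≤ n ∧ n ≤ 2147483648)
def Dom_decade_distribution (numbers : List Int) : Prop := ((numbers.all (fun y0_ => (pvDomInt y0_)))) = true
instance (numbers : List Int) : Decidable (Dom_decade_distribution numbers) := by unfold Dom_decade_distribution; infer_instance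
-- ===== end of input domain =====

-- B replaces A's single mutating pass with its if/elif cascade by six independent counting passes,
-- one per bin, driven by a (key, lo, hi) table (objective: alternative, same asymptotic cost).

-- ===== PORT A =====
-- one iteration of A's for-loop body (the if/elif cascade over the bins dict)
def pvStepA (d : PySem.Dict String Int) (n : Int) : PySem.Dict String Int :=
  if 1 ≤ n ∧ n ≤ 9 then d.modify "d1_09" 0 (· + 1)
  else if 10 ≤ n ∧ n ≤ 19 then d.modify "d10_19" 0 (· + 1)
  else if 20 ≤ n ∧ n ≤ 29 then d.modify "d20_29" 0 (· + 1)
  else if 30 ≤ n ∧ n ≤ 39 then d.modify "d30_39" 0 (· + 1)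
  else if 40 ≤ n ∧ n ≤ 49 then d.modify "d40_49" 0 (· + 1)
  else if 50 ≤ n ∧ n ≤ 54 then d.modify "d50_54" 0 (· + 1)
  else d

def decade_distribution (numbers : List Int) : List (String × Int) :=
  let bins : PySem.Dict String Int :=
    PySem.Dict.ofList [("d1_09", 0), ("d10_19", 0), ("d20_29", 0),
                       ("d30_39", 0), ("d40_49", 0), ("d50_54", 0)]
  (numbers.foldl pvStepA bins).items

-- ===== PORT B =====
-- B's per-bin counting pass: sum(1 for n in numbers if lo <= n <= hi)
def pvCount (numbers : List Int) (lo hi : Int) : Int :=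
  (numbers.countP (fun n => decide (lo ≤ n ∧ n ≤ hi)) : Int)

def decade_distribution_alt (numbers : List Int) : List (String × Int) :=
  let bounds : List (String × Int × Int) :=
    [("d1_09", 1, 9), ("d10_19", 10, 19), ("d20_29", 20, 29),
     ("d30_39", 30, 39), ("d40_49", 40, 49), ("d50_54", 50, 54)]
  bounds.map (fun b => (b.1, pvCount numbers b.2.1 b.2.2))

-- ===== PRECONDITION & SPEC =====
-- A raises ValueError unless the list has exactly 5 pairwise-distinct numbers; B raises there too.
def Pre_decade_distribution (numbers : List Int) : Prop :=
  numbers.length = 5 ∧ numbers.Nodup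
instance (numbers : List Int) : Decidable (Pre_decade_distribution numbers) := by
  unfold Pre_decade_distribution; infer_instance

def pvWitness_decade_distribution : List Int := [3, 10, 27, 50, 54]

def Spec_decade_distribution (numbers : List Int) (out : List (String × Int)) : Prop :=
  out = decade_distribution_alt numbers
instance (numbers : List Int) (out : List (String × Int)) : Decidable (Spec_decade_distribution numbers out) := by
  unfold Spec_decade_distribution; infer_instance

-- ===== CLAIM =====
def Claim_equal_decade_distribution : Prop :=
  ∀ (numbers : List Int), Dom_decade_distribution numbers →
    Pre_decade_distribution numbers →
    Spec_decade_distribution numbers (decade_distribution numbers)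

-- ===== LEMMAS AND PROOFS =====

lemma pvCount_cons (n : Int) (ns : List Int) (lo hi : Int) :
    pvCount (n :: ns) lo hi = (if lo ≤ n ∧ n ≤ hi then 1 else 0) + pvCount ns lo hi := by
  simp [pvCount, List.countP_cons]
  split_ifs <;> omega

-- the whole loop: A's dict over the six literal keys carries each starting value plus B's per-bin count
lemma pvLoop_eq (ns : List Int) : ∀ (b0 b1 b2 b3 b4 b5 : Int),
    ns.foldl pvStepA (PySem.Dict.mk [("d1_09", b0), ("d10_19", b1), ("d20_29", b2), ("d30_39", b3), ("d40_49", b4), ("d50_54", b5)])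
    = PySem.Dict.mk
        [("d1_09", b0 + pvCount ns 1 9), ("d10_19", b1 + pvCount ns 10 19),
         ("d20_29", b2 + pvCount ns 20 29), ("d30_39", b3 + pvCount ns 30 39),
         ("d40_49", b4 + pvCount ns 40 49), ("d50_54", b5 + pvCount ns 50 54)] := by
  induction ns with
  | nil => intro b0 b1 b2 b3 b4 b5; simp [pvCount]
  | cons n ns ih =>
    intro b0 b1 b2 b3 b4 b5
    rcases (by omega : (1 ≤ n ∧ n ≤ 9) ∨ (10 ≤ n ∧ n ≤ 19) ∨ (20 ≤ n ∧ n ≤ 29) ∨ (30 ≤ n ∧ n ≤ 39) ∨ (40 ≤ n ∧ n ≤ 49) ∨ (50 ≤ n ∧ n ≤ 54) ∨ ¬ (1 ≤ n ∧ n ≤ 54)) with h|h|h|h|h|h|h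
    · have ha : pvStepA (PySem.Dict.mk [("d1_09", b0), ("d10_19", b1), ("d20_29", b2), ("d30_39", b3), ("d40_49", b4), ("d50_54", b5)]) n = PySem.Dict.mk [("d1_09", b0 + 1), ("d10_19", b1), ("d20_29", b2), ("d30_39", b3), ("d40_49", b4), ("d50_54", b5)] := by
        unfold pvStepA; rw [if_pos h]; rfl
      rw [List.foldl_cons, ha, ih (b0 + 1) b1 b2 b3 b4 b5]
      simp only [pvCount_cons]
      rw [if_pos h, if_neg (by omega : ¬ (10 ≤ n ∧ n ≤ 19)), if_neg (by omega : ¬ (20 ≤ n ∧ n ≤ 29)), if_neg (by omega : ¬ (30 ≤ n ∧ n ≤ 39)), if_neg (by omega : ¬ (40 ≤ n ∧ n ≤ 49)), if_neg (by omega : ¬ (50 ≤ n ∧ n ≤ 54))]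
      simp [add_assoc]
    · have ha : pvStepA (PySem.Dict.mk [("d1_09", b0), ("d10_19", b1), ("d20_29", b2), ("d30_39", b3), ("d40_49", b4), ("d50_54", b5)]) n = PySem.Dict.mk [("d1_09", b0), ("d10_19", b1 + 1), ("d20_29", b2), ("d30_39", b3), ("d40_49", b4), ("d50_54", b5)] := by
        unfold pvStepA; rw [if_neg (by omega : ¬ (1 ≤ n ∧ n ≤ 9)), if_pos h]; rfl
      rw [List.foldl_cons, ha, ih b0 (b1 + 1) b2 b3 b4 b5]
      simp only [pvCount_cons]
      rw [if_neg (by omega : ¬ (1 ≤ n ∧ n ≤ 9)), if_pos h, if_neg (by omega : ¬ (20 ≤ n ∧ n ≤ 29)), if_neg (by omega : ¬ (30 ≤ n ∧ n ≤ 39)), if_neg (by omega : ¬ (40 ≤ n ∧ n ≤ 49)), if_neg (by omega : ¬ (50 ≤ n ∧ n ≤ 54))]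
      simp [add_assoc]
    · have ha : pvStepA (PySem.Dict.mk [("d1_09", b0), ("d10_19", b1), ("d20_29", b2), ("d30_39", b3), ("d40_49", b4), ("d50_54", b5)]) n = PySem.Dict.mk [("d1_09", b0), ("d10_19", b1), ("d20_29", b2 + 1), ("d30_39", b3), ("d40_49", b4), ("d50_54", b5)] := by
        unfold pvStepA; rw [if_neg (by omega : ¬ (1 ≤ n ∧ n ≤ 9)), if_neg (by omega : ¬ (10 ≤ n ∧ n ≤ 19)), if_pos h]; rfl
      rw [List.foldl_cons, ha, ih b0 b1 (b2 + 1) b3 b4 b5]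
      simp only [pvCount_cons]
      rw [if_neg (by omega : ¬ (1 ≤ n ∧ n ≤ 9)), if_neg (by omega : ¬ (10 ≤ n ∧ n ≤ 19)), if_pos h, if_neg (by omega : ¬ (30 ≤ n ∧ n ≤ 39)), if_neg (by omega : ¬ (40 ≤ n ∧ n ≤ 49)), if_neg (by omega : ¬ (50 ≤ n ∧ n ≤ 54))]
      simp [add_assoc]
    · have ha : pvStepA (PySem.Dict.mk [("d1_09", b0), ("d10_19", b1), ("d20_29", b2), ("d30_39", b3), ("d40_49", b4), ("d50_54", b5)]) n = PySem.Dict.mk [("d1_09", b0), ("d10_19", b1), ("d20_29", b2), ("d30_39", b3 + 1), ("d40_49", b4), ("d50_54", b5)] := by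
        unfold pvStepA; rw [if_neg (by omega : ¬ (1 ≤ n ∧ n ≤ 9)), if_neg (by omega : ¬ (10 ≤ n ∧ n ≤ 19)), if_neg (by omega : ¬ (20 ≤ n ∧ n ≤ 29)), if_pos h]; rfl
      rw [List.foldl_cons, ha, ih b0 b1 b2 (b3 + 1) b4 b5]
      simp only [pvCount_cons]
      rw [if_neg (by omega : ¬ (1 ≤ n ∧ n ≤ 9)), if_neg (by omega : ¬ (10 ≤ n ∧ n ≤ 19)), if_neg (by omega : ¬ (20 ≤ n ∧ n ≤ 29)), if_pos h, if_neg (by omega : ¬ (40 ≤ n ∧ n ≤ 49)), if_neg (by omega : ¬ (50 ≤ n ∧ n ≤ 54))]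
      simp [add_assoc]
    · have ha : pvStepA (PySem.Dict.mk [("d1_09", b0), ("d10_19", b1), ("d20_29", b2), ("d30_39", b3), ("d40_49", b4), ("d50_54", b5)]) n = PySem.Dict.mk [("d1_09", b0), ("d10_19", b1), ("d20_29", b2), ("d30_39", b3), ("d40_49", b4 + 1), ("d50_54", b5)] := by
        unfold pvStepA; rw [if_neg (by omega : ¬ (1 ≤ n ∧ n ≤ 9)), if_neg (by omega : ¬ (10 ≤ n ∧ n ≤ 19)), if_neg (by omega : ¬ (20 ≤ n ∧ n ≤ 29)), if_neg (by omega : ¬ (30 ≤ n ∧ n ≤ 39)), if_pos h]; rfl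
      rw [List.foldl_cons, ha, ih b0 b1 b2 b3 (b4 + 1) b5]
      simp only [pvCount_cons]
      rw [if_neg (by omega : ¬ (1 ≤ n ∧ n ≤ 9)), if_neg (by omega : ¬ (10 ≤ n ∧ n ≤ 19)), if_neg (by omega : ¬ (20 ≤ n ∧ n ≤ 29)), if_neg (by omega : ¬ (30 ≤ n ∧ n ≤ 39)), if_pos h, if_neg (by omega : ¬ (50 ≤ n ∧ n ≤ 54))]
      simp [add_assoc]
    · have ha : pvStepA (PySem.Dict.mk [("d1_09", b0), ("d10_19", b1), ("d20_29", b2), ("d30_39", b3), ("d40_49", b4), ("d50_54", b5)]) n = PySem.Dict.mk [("d1_09", b0), ("d10_19", b1), ("d20_29", b2), ("d30_39", b3), ("d40_49", b4), ("d50_54", b5 + 1)] := by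
        unfold pvStepA; rw [if_neg (by omega : ¬ (1 ≤ n ∧ n ≤ 9)), if_neg (by omega : ¬ (10 ≤ n ∧ n ≤ 19)), if_neg (by omega : ¬ (20 ≤ n ∧ n ≤ 29)), if_neg (by omega : ¬ (30 ≤ n ∧ n ≤ 39)), if_neg (by omega : ¬ (40 ≤ n ∧ n ≤ 49)), if_pos h]; rfl
      rw [List.foldl_cons, ha, ih b0 b1 b2 b3 b4 (b5 + 1)]
      simp only [pvCount_cons]
      rw [if_neg (by omega : ¬ (1 ≤ n ∧ n ≤ 9)), if_neg (by omega : ¬ (10 ≤ n ∧ n ≤ 19)), if_neg (by omega : ¬ (20 ≤ n ∧ n ≤ 29)), if_neg (by omega : ¬ (30 ≤ n ∧ n ≤ 39)), if_neg (by omega : ¬ (40 ≤ n ∧ n ≤ 49)), if_pos h]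
      simp [add_assoc]
    · have ha : pvStepA (PySem.Dict.mk [("d1_09", b0), ("d10_19", b1), ("d20_29", b2), ("d30_39", b3), ("d40_49", b4), ("d50_54", b5)]) n = PySem.Dict.mk [("d1_09", b0), ("d10_19", b1), ("d20_29", b2), ("d30_39", b3), ("d40_49", b4), ("d50_54", b5)] := by
        unfold pvStepA; rw [if_neg (by omega : ¬ (1 ≤ n ∧ n ≤ 9)), if_neg (by omega : ¬ (10 ≤ n ∧ n ≤ 19)), if_neg (by omega : ¬ (20 ≤ n ∧ n ≤ 29)), if_neg (by omega : ¬ (30 ≤ n ∧ n ≤ 39)), if_neg (by omega : ¬ (40 ≤ n ∧ n ≤ 49)), if_neg (by omega : ¬ (50 ≤ n ∧ n ≤ 54))]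
      rw [List.foldl_cons, ha, ih b0 b1 b2 b3 b4 b5]
      simp only [pvCount_cons]
      rw [if_neg (by omega : ¬ (1 ≤ n ∧ n ≤ 9)), if_neg (by omega : ¬ (10 ≤ n ∧ n ≤ 19)), if_neg (by omega : ¬ (20 ≤ n ∧ n ≤ 29)), if_neg (by omega : ¬ (30 ≤ n ∧ n ≤ 39)), if_neg (by omega : ¬ (40 ≤ n ∧ n ≤ 49)), if_neg (by omega : ¬ (50 ≤ n ∧ n ≤ 54))]
      simp

-- ===== VERDICT =====
theorem decade_distribution_spec : Claim_equal_decade_distribution := by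
  intro numbers _ _
  show decade_distribution numbers = decade_distribution_alt numbers
  unfold decade_distribution decade_distribution_alt
  have h0 : PySem.Dict.ofList [("d1_09", (0:Int)), ("d10_19", 0), ("d20_29", 0),
      ("d30_39", 0), ("d40_49", 0), ("d50_54", 0)]
      = PySem.Dict.mk [("d1_09", 0), ("d10_19", 0), ("d20_29", 0),
                       ("d30_39", 0), ("d40_49", 0), ("d50_54", 0)] := by decide
  simp only [h0, pvLoop_eq]
  simp
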